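-- pv_equiv track=rewrite | github.com/AdiToubin/project | models/article_model.py | guess_topic
-- ===== SOURCE A (Python) =====
-- def guess_topic(title: str | None, source: str | None) -> str:
--     """Determine article topic based on title and source"""
--     if not title:
--         title = ""
--     title = title.lower()
--     source = (source or "").lower()
--
--     if any(w in title for w in ["football", "nba", "sport", "soccer", "game"]):
--         return "Sports"
--     if any(w in title for w in ["stock", "market", "economy", "finance", "dollar", "business"]):
--         return "Economy"
--     if any(w in title for w in ["gaza", "idf", "war", "attack", "israel", "security", "russia", "ukraine"]):
--         return "Defense"
--     if any(w in title for w in ["weather", "forecast", "temperature", "storm", "rain"]):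
--         return "Weather"
--     if any(w in title for w in ["tech", "ai", "app", "software", "google", "apple"]):
--         return "Technology"
--     if any(w in title for w in ["politic", "president", "minister", "election", "law", "government"]):
--         return "Politics"
--     if "cnn" in source or "bbc" in source:
--         return "World"
--     return "General"
-- ===== SOURCE B (Python) =====
-- # Collect-then-select: one pass over a flat keyword->category index gathers ALL
-- # matching categories, then the highest-priority one is chosen; no per-category
-- # early-return chain.
-- _KEYWORD_INDEX = [
--     ("football", "Sports"), ("nba", "Sports"), ("sport", "Sports"),
--     ("soccer", "Sports"), ("game", "Sports"),
--     ("stock", "Economy"), ("market", "Economy"), ("economy", "Economy"),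
--     ("finance", "Economy"), ("dollar", "Economy"), ("business", "Economy"),
--     ("gaza", "Defense"), ("idf", "Defense"), ("war", "Defense"),
--     ("attack", "Defense"), ("israel", "Defense"), ("security", "Defense"),
--     ("russia", "Defense"), ("ukraine", "Defense"),
--     ("weather", "Weather"), ("forecast", "Weather"), ("temperature", "Weather"),
--     ("storm", "Weather"), ("rain", "Weather"),
--     ("tech", "Technology"), ("ai", "Technology"), ("app", "Technology"),
--     ("software", "Technology"), ("google", "Technology"), ("apple", "Technology"),
--     ("politic", "Politics"), ("president", "Politics"), ("minister", "Politics"),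
--     ("election", "Politics"), ("law", "Politics"), ("government", "Politics"),
-- ]
-- _PRIORITY = ["Sports", "Economy", "Defense", "Weather", "Technology", "Politics"]
--
-- def guess_topic(title: str | None, source: str | None) -> str:
--     t = (title or "").lower()
--     matched = [cat for kw, cat in _KEYWORD_INDEX if kw in t]
--     for cat in _PRIORITY:
--         if cat in matched:
--             return cat
--     s = (source or "").lower()
--     if "cnn" in s or "bbc" in s:
--         return "World"
--     return "General"
-- ===== Notes on version B (the rewrite author's own statement) =====
-- stated objective: alternative
-- what changed: Instead of A's per-category early-return chain of any()-tests, B builds a flat keyword->category inverted index, collects ALL categories with a matching keyword in one comprehension pass, then selects the highest-priority matched category (collect-then-select), falling back to the source-based 'World' check and 'General'.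
import Mathlib
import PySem

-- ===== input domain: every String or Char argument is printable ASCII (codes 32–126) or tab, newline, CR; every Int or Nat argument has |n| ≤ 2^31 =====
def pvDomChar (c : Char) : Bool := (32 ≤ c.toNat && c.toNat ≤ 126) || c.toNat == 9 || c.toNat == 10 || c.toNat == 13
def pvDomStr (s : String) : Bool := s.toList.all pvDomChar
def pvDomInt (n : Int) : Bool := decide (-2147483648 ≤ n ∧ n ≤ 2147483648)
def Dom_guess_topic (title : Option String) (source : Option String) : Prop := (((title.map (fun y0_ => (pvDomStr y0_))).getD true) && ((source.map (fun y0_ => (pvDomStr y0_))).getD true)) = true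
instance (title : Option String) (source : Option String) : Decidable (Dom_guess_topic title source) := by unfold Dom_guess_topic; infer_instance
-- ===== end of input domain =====

-- B replaces A's per-category early-return chain by collect-then-select over a flat
-- keyword->category index (alternative decomposition; same behaviour, same cost).

-- ===== PORT A =====
def guess_topic (title : Option String) (source : Option String) : String :=
  -- `if not title: title = ""` + `.lower()` / `(source or "").lower()`
  let t := PySem.Str.lower (title.getD "")
  let s := PySem.Str.lower (source.getD "")
  if (["football", "nba", "sport", "soccer", "game"].any fun w => PySem.Str.isIn w t) then "Sports"
  else if (["stock", "market", "economy", "finance", "dollar", "business"].any fun w => PySem.Str.isIn w t) then "Economy"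
  else if (["gaza", "idf", "war", "attack", "israel", "security", "russia", "ukraine"].any fun w => PySem.Str.isIn w t) then "Defense"
  else if (["weather", "forecast", "temperature", "storm", "rain"].any fun w => PySem.Str.isIn w t) then "Weather"
  else if (["tech", "ai", "app", "software", "google", "apple"].any fun w => PySem.Str.isIn w t) then "Technology"
  else if (["politic", "president", "minister", "election", "law", "government"].any fun w => PySem.Str.isIn w t) then "Politics"
  else if PySem.Str.isIn "cnn" s || PySem.Str.isIn "bbc" s then "World"
  else "General"

-- ===== PORT B =====
-- the flat keyword->category index of Source B
def pvKeywordIndex : List (String × String) :=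
  [ ("football", "Sports"), ("nba", "Sports"), ("sport", "Sports"),
    ("soccer", "Sports"), ("game", "Sports"),
    ("stock", "Economy"), ("market", "Economy"), ("economy", "Economy"),
    ("finance", "Economy"), ("dollar", "Economy"), ("business", "Economy"),
    ("gaza", "Defense"), ("idf", "Defense"), ("war", "Defense"),
    ("attack", "Defense"), ("israel", "Defense"), ("security", "Defense"),
    ("russia", "Defense"), ("ukraine", "Defense"),
    ("weather", "Weather"), ("forecast", "Weather"), ("temperature", "Weather"),
    ("storm", "Weather"), ("rain", "Weather"),
    ("tech", "Technology"), ("ai", "Technology"), ("app", "Technology"),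
    ("software", "Technology"), ("google", "Technology"), ("apple", "Technology"),
    ("politic", "Politics"), ("president", "Politics"), ("minister", "Politics"),
    ("election", "Politics"), ("law", "Politics"), ("government", "Politics") ]

def pvPriority : List String :=
  ["Sports", "Economy", "Defense", "Weather", "Technology", "Politics"]

-- the `for cat in _PRIORITY: if cat in matched: return cat` loop with early return
def pvSelect (matched : List String) : List String → Option String
  | [] => none
  | cat :: rest => if matched.contains cat then some cat else pvSelect matched rest

def guess_topic_alt (title : Option String) (source : Option String) : String :=
  let t := PySem.Str.lower (title.getD "")
  -- `[cat for kw, cat in _KEYWORD_INDEX if kw in t]`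
  let matched := (pvKeywordIndex.filter (fun p => PySem.Str.isIn p.1 t)).map Prod.snd
  match pvSelect matched pvPriority with
  | some cat => cat
  | none =>
    let s := PySem.Str.lower (source.getD "")
    if PySem.Str.isIn "cnn" s || PySem.Str.isIn "bbc" s then "World"
    else "General"

-- ===== PRECONDITION & SPEC =====
def Spec_guess_topic (title : Option String) (source : Option String) (out : String) : Prop := out = guess_topic_alt title source
instance (title : Option String) (source : Option String) (out : String) : Decidable (Spec_guess_topic title source out) := by unfold Spec_guess_topic; infer_instance

-- ===== CLAIM (what is proved, stated in full; the proofs are below) =====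
def Claim_equal_guess_topic : Prop := ∀ (title : Option String) (source : Option String), Dom_guess_topic title source → Spec_guess_topic title source (guess_topic title source)

-- ===== LEMMAS AND PROOFS =====
theorem contains_filter_map (l : List (String × String)) (f : String → Bool) (c : String) :
    ((l.filter (fun p => f p.1)).map Prod.snd).contains c = l.any (fun p => f p.1 && p.2 == c) := by
  induction l with
  | nil => rfl
  | cons a l ih =>
    rw [List.filter_cons]
    cases hfa : f a.1
    · simp only [Bool.false_eq_true, if_false, List.any_cons, hfa, Bool.false_and,
        Bool.false_or, ih]
    · simp only [if_true, List.map_cons, List.contains_cons, List.any_cons, hfa,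
        Bool.true_and, ih]
      congr 1
      exact BEq.comm

theorem contains_index (t c : String) :
    ((pvKeywordIndex.filter (fun p => PySem.Str.isIn p.1 t)).map Prod.snd).contains c
      = pvKeywordIndex.any (fun p => PySem.Str.isIn p.1 t && p.2 == c) :=
  contains_filter_map pvKeywordIndex (fun kw => PySem.Str.isIn kw t) c

-- ===== VERDICT (by name: the statement is the Claim_ definition above) =====
set_option maxHeartbeats 1600000 in
theorem guess_topic_spec : Claim_equal_guess_topic := by
  intro title source _
  unfold Spec_guess_topic guess_topic guess_topic_alt
  simp only [pvPriority, pvSelect, contains_index]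
  simp only [pvKeywordIndex, List.any_cons, List.any_nil,
    Bool.or_false, Bool.and_true, Bool.and_false, Bool.false_or,
    String.reduceBEq, beq_self_eq_true]
  split_ifs <;> rfl
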